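-- pv_equiv track=rewrite | github.com/arbujamruta/Amazon-scraper- | amazon/amazon/spiders/amazon.py | remove_empty
-- ===== SOURCE A (Python) =====
-- def remove_empty(l):
--     i = len(l) - 1
--     while (i >= 0):
--         l[i] = l[i].strip()
--         if l[i] == "":
--             l.pop(i)
--         i = i - 1
--     return l
-- ===== SOURCE B (Python) =====
-- def remove_empty(l):
--     w = 0
--     for i in range(len(l)):
--         s = l[i].strip()
--         if s != "":
--             l[w] = s
--             w += 1
--     del l[w:]
--     return l
-- ===== Notes on version B (the rewrite author's own statement) =====
-- stated objective: alternative
-- what changed: Replaces the backward while-loop that strips each element and pops empties one by one with a forward two-pointer compaction: a write cursor copies stripped non-empty strings forward and the surplus tail is truncated once at the end.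
import Mathlib
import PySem

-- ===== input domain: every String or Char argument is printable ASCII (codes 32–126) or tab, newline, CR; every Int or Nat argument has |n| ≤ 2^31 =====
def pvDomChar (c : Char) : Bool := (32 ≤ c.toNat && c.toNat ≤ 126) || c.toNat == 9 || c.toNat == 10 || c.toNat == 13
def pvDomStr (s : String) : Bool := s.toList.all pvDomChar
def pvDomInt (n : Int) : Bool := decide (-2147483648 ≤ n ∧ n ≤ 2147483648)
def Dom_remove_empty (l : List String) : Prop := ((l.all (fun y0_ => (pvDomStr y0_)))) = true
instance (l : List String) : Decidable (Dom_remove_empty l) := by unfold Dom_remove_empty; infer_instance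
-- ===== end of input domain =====

-- B replaces A's backward strip-and-pop loop with a forward two-pointer compaction
-- (write cursor + one final truncation); return value proved equal, both mutate in place in Python.

-- ===== PORT A =====
-- A's while-loop: i runs len(l)-1 down to 0; strip l[i] in place, pop it if empty.
def removeLoopA (l : List String) (i : Int) : List String :=
  if h : 0 ≤ i then
    let s := PySem.Str.strip (l.getD i.toNat "")   -- l[i] = l[i].strip(); index provably in range
    let l' := l.set i.toNat s
    let l'' := if s = "" then l'.eraseIdx i.toNat else l'   -- l.pop(i)
    removeLoopA l'' (i - 1)
  else l
termination_by (i + 1).toNat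
decreasing_by omega

def remove_empty (l : List String) : List String :=
  removeLoopA l ((l.length : Int) - 1)

-- ===== PORT B =====
-- B's loop body: s = l[i].strip(); if s != "": l[w] = s; w += 1   (state = (l, w))
def stepB (st : List String × Nat) (i : Int) : List String × Nat :=
  let s := PySem.Str.strip (st.1.getD i.toNat "")
  if s ≠ "" then (st.1.set st.2 s, st.2 + 1) else st

def remove_empty_alt (l : List String) : List String :=
  let st := (PySem.List.pyRange 0 (l.length : Int) 1).foldl stepB (l, 0)
  st.1.take st.2   -- del l[w:]; return l

-- ===== PRECONDITION & SPEC =====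
def Spec_remove_empty (l : List String) (out : List String) : Prop := out = remove_empty_alt l
instance (l : List String) (out : List String) : Decidable (Spec_remove_empty l out) := by unfold Spec_remove_empty; infer_instance

-- ===== CLAIM (what is proved, stated in full; the proofs are below) =====
def Claim_equal_remove_empty : Prop := ∀ (l : List String), Dom_remove_empty l → Spec_remove_empty l (remove_empty l)

-- ===== LEMMAS AND PROOFS =====

-- the common specification value: strip every string, keep the non-empty results
def stripKeep (s : String) : Option String :=
  if PySem.Str.strip s = "" then none else some (PySem.Str.strip s)

theorem removeLoopA_spec (p q : List String) :
    removeLoopA (p ++ q) ((p.length : Int) - 1) = p.filterMap stripKeep ++ q := by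
  induction p using List.reverseRecOn generalizing q with
  | nil => rw [removeLoopA]; simp
  | append_singleton p' x ih =>
    rw [removeLoopA]
    have hlen : (p' ++ [x] : List String).length = p'.length + 1 := by simp
    have hpos : (0:Int) ≤ ((p' ++ [x]).length : Int) - 1 := by simp [hlen]
    rw [dif_pos hpos]
    have htn : (((p' ++ [x]).length : Int) - 1).toNat = p'.length := by simp [hlen]
    have hassoc : (p' ++ [x]) ++ q = p' ++ (x :: q) := by simp
    have hget : ((p' ++ [x]) ++ q).getD p'.length "" = x := by
      rw [hassoc]; simp [List.getD_eq_getElem?_getD]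
    simp only [htn, hget]
    set s := PySem.Str.strip x with hs
    have hset : ((p' ++ [x]) ++ q).set p'.length s = p' ++ (s :: q) := by
      rw [hassoc]
      simp
    by_cases he : s = ""
    · rw [if_pos he]
      have her : (p' ++ (s :: q)).eraseIdx p'.length = p' ++ q := by
        simp [List.eraseIdx_append_of_length_le (Nat.le_refl p'.length)]
      rw [hset, her]
      have : ((p' ++ [x]).length : Int) - 1 - 1 = (p'.length : Int) - 1 := by simp [hlen]
      rw [this, ih]
      simp [stripKeep, ← hs, he]
    · rw [if_neg he, hset]
      have : ((p' ++ [x]).length : Int) - 1 - 1 = (p'.length : Int) - 1 := by simp [hlen]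
      rw [this, ih]
      simp [stripKeep, ← hs, he]


theorem remove_empty_eq (l : List String) : remove_empty l = l.filterMap stripKeep := by
  have h := removeLoopA_spec l []
  simpa [remove_empty] using h

theorem foldB_invariant (l : List String) (n : Nat) (hn : n ≤ l.length) :
    let st := (PySem.List.pyRange 0 (n : Int) 1).foldl stepB (l, 0)
    st.1.length = l.length ∧ st.2 ≤ n ∧
      st.1.take st.2 = (l.take n).filterMap stripKeep ∧ st.1.drop n = l.drop n := by
  induction n with
  | zero => simp [PySem.List.pyRange_one_eq_nil]
  | succ n ih =>
    have hn' : n ≤ l.length := Nat.le_of_succ_le hn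
    have hsplit : PySem.List.pyRange 0 ((n:Int)+1) 1
        = PySem.List.pyRange 0 (n:Int) 1 ++ [(n:Int)] := by
      exact PySem.List.pyRange_one_succ_right (by omega)
    simp only [Nat.cast_add, Nat.cast_one, hsplit, List.foldl_append, List.foldl_cons,
      List.foldl_nil] at *
    obtain ⟨hlen, hw, htake, hdrop⟩ := ih hn'
    set st := (PySem.List.pyRange 0 (n:Int) 1).foldl stepB (l, 0) with hst
    have hnl : n < l.length := hn
    have hG : st.1[n]? = l[n]? := by
      have h1 := List.getElem?_drop (xs := st.1) (i := n) (j := 0)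
      have h2 := List.getElem?_drop (xs := l) (i := n) (j := 0)
      rw [hdrop] at h1
      simpa using h1.symm.trans h2
    have hln : l[n]? = some (l.getD n "") := by
      simp [List.getD_eq_getElem?_getD, List.getElem?_eq_getElem hnl]
    have hget : st.1.getD ((n:Int)).toNat "" = l.getD n "" := by
      simp only [Int.toNat_natCast, List.getD_eq_getElem?_getD, hG]
    by_cases he : PySem.Str.strip (l.getD n "") = ""
    · -- empty: state unchanged
      have hstep : stepB st (n:Int) = st := by
        simp only [stepB, hget]
        exact if_neg (fun hne => hne he)
      rw [hstep]
      refine ⟨hlen, by omega, ?_, ?_⟩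
      · have hsing : List.filterMap stripKeep [l.getD n ""] = [] := by
          simp only [List.filterMap_cons, List.filterMap_nil, stripKeep]
          rw [if_pos he]
        rw [htake, List.take_add_one, hln]
        simp only [Option.toList_some, List.filterMap_append, hsing, List.append_nil]
      · have := congrArg (List.drop 1) hdrop
        simpa [List.drop_drop, Nat.add_comm] using this
    · -- non-empty: write at w
      have hstep : stepB st (n:Int) = (st.1.set st.2 (PySem.Str.strip (l.getD n "")), st.2 + 1) := by
        simp only [stepB, hget]
        exact if_pos he
      rw [hstep]
      have hwlt : st.2 < st.1.length := by omega
      refine ⟨by simp [hlen], by omega, ?_, ?_⟩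
      · rw [List.take_add_one, List.take_set]
        have hout : (st.1.take st.2).set st.2 (PySem.Str.strip (l.getD n "")) = st.1.take st.2 :=
          List.set_eq_of_length_le (by simp)
        have hin : (st.1.set st.2 (PySem.Str.strip (l.getD n "")))[st.2]?
            = some (PySem.Str.strip (l.getD n "")) := by
          rw [List.getElem?_set_self hwlt]
        have hsing : List.filterMap stripKeep [l.getD n ""] = [PySem.Str.strip (l.getD n "")] := by
          simp only [List.filterMap_cons, List.filterMap_nil, stripKeep]
          rw [if_neg he]
        rw [hout, hin, htake, List.take_add_one, hln]
        simp only [Option.toList_some, List.filterMap_append, hsing]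
      · rw [List.drop_set, if_pos (by omega : st.2 < n + 1)]
        have := congrArg (List.drop 1) hdrop
        simpa [List.drop_drop, Nat.add_comm] using this


theorem remove_empty_alt_eq (l : List String) : remove_empty_alt l = l.filterMap stripKeep := by
  have h := foldB_invariant l l.length le_rfl
  simp only at h
  obtain ⟨hlen, hw, htake, hdrop⟩ := h
  simpa [remove_empty_alt] using htake

-- ===== VERDICT (by name: the statement is the Claim_ definition above) =====
theorem remove_empty_spec : Claim_equal_remove_empty := by
  intro l _
  unfold Spec_remove_empty
  rw [remove_empty_eq, remove_empty_alt_eq]
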